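-- pv_equiv track=rewrite | github.com/Noelbiggs28/advent_of_code | 23/day_09/day_09.py | find_prev_number
-- ===== SOURCE A (Python) =====
-- def find_prev_number(data_set):
--     next_data_set =[]
--     x=0
--     for index in range(len(data_set)-1):
--         x = data_set[index] - data_set[index+1]
--         next_data_set.append(x)
--
--
--     if all([number==0 for number in next_data_set]):
--         return data_set[-1]
--     else:
--         return data_set[-1] - find_prev_number(next_data_set)
-- ===== SOURCE B (Python) =====
-- def find_prev_number(data_set):
--     n = len(data_set)
--     total = 0
--     coef = 1                       # C(n, i), maintained incrementally
--     sign = -1 if n % 2 == 0 else 1  # (-1) ** (n - 1 - i), starting at i = 0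
--     i = 0
--     for value in data_set:
--         total += sign * coef * value
--         coef = coef * (n - i) // (i + 1)
--         sign = -sign
--         i += 1
--     return total
-- ===== Notes on version B (the rewrite author's own statement) =====
-- stated objective: faster
-- what changed: Replaced the recursive difference-table construction with the closed-form signed-binomial linear combination sum_i (-1)^(n-1-i)*C(n,i)*a_i, computed in a single pass with incrementally updated binomial coefficients.
import Mathlib
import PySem

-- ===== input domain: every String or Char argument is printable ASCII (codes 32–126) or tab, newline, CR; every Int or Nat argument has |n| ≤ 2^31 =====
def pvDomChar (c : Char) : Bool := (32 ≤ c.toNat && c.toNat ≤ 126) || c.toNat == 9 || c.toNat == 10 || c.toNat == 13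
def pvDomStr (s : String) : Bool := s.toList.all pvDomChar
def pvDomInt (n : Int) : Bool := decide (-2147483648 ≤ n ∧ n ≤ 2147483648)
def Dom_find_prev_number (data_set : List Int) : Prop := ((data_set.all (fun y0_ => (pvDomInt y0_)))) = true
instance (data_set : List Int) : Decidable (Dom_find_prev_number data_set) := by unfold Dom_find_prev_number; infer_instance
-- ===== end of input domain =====

-- B replaces A's O(n^2) recursive difference table by the closed-form signed-binomial
-- combination of the elements, computed in one O(n) pass.

-- ===== PORT A =====
-- the loop building next_data_set (for index in range(len(data_set)-1): append a[i]-a[i+1])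
def pv_next (data_set : List Int) : List Int :=
  (PySem.List.pyRange 0 ((data_set.length : Int) - 1) 1).foldl
    (fun acc index =>
      acc ++ [PySem.List.pyGetD data_set index 0 - PySem.List.pyGetD data_set (index + 1) 0]) []

-- needed by the port's termination proof
theorem pv_next_eq_map (data_set : List Int) :
    pv_next data_set =
      (List.range (data_set.length - 1)).map
        (fun k => data_set.getD k 0 - data_set.getD (k + 1) 0) := by
  unfold pv_next
  rw [PySem.List.foldl_append_singleton_eq_map, PySem.List.pyRange_one]
  rw [List.map_map]
  have hlen : ((data_set.length : Int) - 1 - 0).toNat = data_set.length - 1 := by omega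
  rw [hlen, List.nil_append]
  apply List.map_congr_left
  intro k _
  simp only [Function.comp, zero_add]
  have h1 : ((k : Int) + 1) = ((k + 1 : Nat) : Int) := by push_cast; ring
  rw [h1, PySem.List.pyGetD_natCast, PySem.List.pyGetD_natCast]

theorem pv_next_length (data_set : List Int) :
    (pv_next data_set).length = data_set.length - 1 := by
  rw [pv_next_eq_map]; simp

def find_prev_number (data_set : List Int) : Int :=
  let next_data_set := pv_next data_set
  if _h : next_data_set.all (fun number => number == 0) then
    PySem.List.pyGetD data_set (-1) 0
  else
    PySem.List.pyGetD data_set (-1) 0 - find_prev_number next_data_set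
termination_by data_set.length
decreasing_by
  show (pv_next data_set).length < data_set.length
  have hne : pv_next data_set ≠ [] := by
    intro hnil
    exact _h (show (pv_next data_set).all (fun number => number == 0) = true by
      rw [hnil]; rfl)
  have h1 := pv_next_length data_set
  have h2 : 0 < (pv_next data_set).length := List.length_pos_iff.mpr hne
  omega

-- ===== PORT B =====
-- the single pass of Source B: state (total, coef, sign, i), one step per element
def pv_altLoop (n total coef sign i : Int) : List Int → Int
  | [] => total
  | value :: rest =>
      pv_altLoop n (total + sign * coef * value)
        (PySem.Int.floordiv (coef * (n - i)) (i + 1)) (-sign) (i + 1) rest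

def find_prev_number_alt (data_set : List Int) : Int :=
  let n : Int := data_set.length
  pv_altLoop n 0 1 (if PySem.Int.mod n 2 = 0 then -1 else 1) 0 data_set

-- ===== PRECONDITION & SPEC =====
-- A raises IndexError on the empty list (data_set[-1]); Pre_ excludes exactly it.
def Pre_find_prev_number (data_set : List Int) : Prop := data_set ≠ []
instance (data_set : List Int) : Decidable (Pre_find_prev_number data_set) := by
  unfold Pre_find_prev_number; infer_instance

def pvWitness_find_prev_number : List Int := [10, 13, 16, 21, 30, 45]

def Spec_find_prev_number (data_set : List Int) (out : Int) : Prop :=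
  out = find_prev_number_alt data_set
instance (data_set : List Int) (out : Int) : Decidable (Spec_find_prev_number data_set out) := by
  unfold Spec_find_prev_number; infer_instance

-- ===== CLAIM (what is proved, stated in full; the proofs are below) =====
def Claim_equal_find_prev_number : Prop :=
  ∀ (data_set : List Int), Dom_find_prev_number data_set →
    Pre_find_prev_number data_set →
    Spec_find_prev_number data_set (find_prev_number data_set)

-- ===== LEMMAS AND PROOFS =====

-- the signed binomial coefficient (-1)^(n-1-i) * C(n,i), written without Nat truncation
def pvCoef (n i : Nat) : Int := (-1) ^ (n + i + 1) * (n.choose i)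

-- the closed form both programs compute: sum of pvCoef n i * a_i over i < n
def pvSum (n : Nat) (a : List Int) : Int :=
  ∑ i ∈ Finset.range n, pvCoef n i * a.getD i 0

theorem pv_altLoop_inv (n : Nat) :
    ∀ (rest : List Int) (k : Nat) (total : Int), k + rest.length = n →
      pv_altLoop (n : Int) total (n.choose k) ((-1) ^ (n + k + 1)) (k : Int) rest =
        total + ∑ j ∈ Finset.range rest.length, pvCoef n (k + j) * rest.getD j 0 := by
  intro rest
  induction rest with
  | nil => intro k total _; simp [pv_altLoop]
  | cons value rest ih =>
    intro k total hk
    rw [pv_altLoop]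
    have hkn : k < n := by simp at hk; omega
    -- the coefficient update computes C(n, k+1)
    have hcoef : PySem.Int.floordiv ((n.choose k : Int) * ((n : Int) - (k : Int))) ((k : Int) + 1)
        = (n.choose (k + 1) : Int) := by
      have h1 : (n.choose k : Int) * ((n : Int) - (k : Int)) = ((n.choose k * (n - k) : Nat) : Int) := by
        push_cast [Nat.cast_sub (le_of_lt hkn)]; ring
      have h2 : ((k : Int) + 1) = ((k + 1 : Nat) : Int) := by push_cast; ring
      rw [h1, h2, PySem.Int.floordiv_natCast, ← Nat.choose_succ_right_eq,
        Nat.mul_div_cancel _ (Nat.succ_pos k)]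
    have hsign : -((-1 : Int) ^ (n + k + 1)) = (-1) ^ (n + (k + 1) + 1) := by
      have : n + (k + 1) + 1 = (n + k + 1) + 1 := by ring
      rw [this, pow_succ]; ring
    have hki : ((k : Int) + 1) = ((k + 1 : Nat) : Int) := by push_cast; ring
    rw [hcoef, hsign, hki, ih (k + 1) _ (by simp at hk ⊢; omega)]
    rw [List.length_cons, Finset.sum_range_succ']
    have hterm : ∀ j, ((value :: rest).getD (j + 1) 0) = rest.getD j 0 := by intro j; rfl
    simp only [hterm, List.getD_cons_zero]
    have h0 : pvCoef n (k + 0) * value = (-1 : Int) ^ (n + k + 1) * (n.choose k) * value := by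
      simp [pvCoef]
    have hshift : ∀ j, k + (j + 1) = (k + 1) + j := by intro j; ring
    conv_rhs => rw [Finset.sum_congr rfl (fun j _ => by rw [hshift j])]
    rw [h0]
    ring

theorem pv_alt_eq_pvSum (a : List Int) :
    find_prev_number_alt a = pvSum a.length a := by
  unfold find_prev_number_alt
  show pv_altLoop ((a.length : Int)) 0 1
      (if PySem.Int.mod ((a.length : Int)) 2 = 0 then -1 else 1) 0 a = pvSum a.length a
  have hsign : (if PySem.Int.mod (a.length : Int) 2 = 0 then (-1 : Int) else 1)
      = (-1) ^ (a.length + 0 + 1) := by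
    have h2 : (2 : Int) = ((2 : Nat) : Int) := rfl
    rw [h2, PySem.Int.mod_natCast]
    rcases Nat.even_or_odd a.length with he | ho
    · have : a.length % 2 = 0 := Nat.even_iff.mp he
      simp [this, Odd.neg_one_pow (by simpa using he.add_one)]
    · have h1 : a.length % 2 = 1 := Nat.odd_iff.mp ho
      have : ¬ ((1 : Int) = 0) := one_ne_zero
      simp only [h1, Nat.cast_one, this, if_false]
      rw [Even.neg_one_pow (by simpa using ho.add_one)]
  rw [hsign]
  have h := pv_altLoop_inv a.length a 0 0 (by simp)
  simp only [Nat.choose_zero_right, Nat.cast_one, Nat.cast_zero] at h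
  rw [h]
  simp [pvSum]

-- the one-step identity: pvSum n a = a_{n-1} - pvSum (n-1) (differences), n = m + 2
theorem pv_step (m : Nat) (a : List Int) :
    pvSum (m + 2) a =
      a.getD (m + 1) 0 -
        ∑ i ∈ Finset.range (m + 1), pvCoef (m + 1) i * (a.getD i 0 - a.getD (i + 1) 0) := by
  have hcm : pvCoef (m + 1) (m + 1) = -1 := by
    simp only [pvCoef, Nat.choose_self, Nat.cast_one, mul_one]
    have e : m + 1 + (m + 1) + 1 = 2 * (m + 1) + 1 := by ring
    rw [e, pow_succ, pow_mul]
    norm_num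
  have hc0 : pvCoef (m + 1) 0 = -(-1 : Int) ^ (m + 1) := by
    simp only [pvCoef, Nat.choose_zero_right, Nat.cast_one, mul_one, add_zero]
    rw [pow_succ]
    ring
  have f1 : ∑ i ∈ Finset.range (m + 2), pvCoef (m + 1) i * a.getD i 0
      = (∑ i ∈ Finset.range (m + 1), pvCoef (m + 1) i * a.getD i 0) - a.getD (m + 1) 0 := by
    rw [Finset.sum_range_succ, hcm]
    ring
  have f2 : ∑ i ∈ Finset.range (m + 2), pvCoef (m + 1) (i - 1) * a.getD i 0
      = (∑ i ∈ Finset.range (m + 1), pvCoef (m + 1) i * a.getD (i + 1) 0)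
        + pvCoef (m + 1) 0 * a.getD 0 0 := by
    rw [Finset.sum_range_succ' (fun i => pvCoef (m + 1) (i - 1) * a.getD i 0) (m + 1)]
    simp
  have f3 : pvSum (m + 2) a
      = (∑ i ∈ Finset.range (m + 2), pvCoef (m + 1) (i - 1) * a.getD i 0)
        - (∑ i ∈ Finset.range (m + 2), pvCoef (m + 1) i * a.getD i 0)
        + (-1) ^ (m + 1) * a.getD 0 0 := by
    unfold pvSum
    have hpt : ∀ i ∈ Finset.range (m + 2),
        pvCoef (m + 2) i * a.getD i 0
          = (pvCoef (m + 1) (i - 1) * a.getD i 0 - pvCoef (m + 1) i * a.getD i 0)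
            + (if i = 0 then (-1 : Int) ^ (m + 1) * a.getD 0 0 else 0) := by
      intro i _
      match i with
      | 0 =>
        rw [if_pos rfl]
        simp only [pvCoef, Nat.choose_zero_right, Nat.cast_one, Nat.zero_sub, mul_one]
        have e : m + 2 + 0 + 1 = (m + 1) + 2 := by ring
        rw [e, pow_succ, pow_succ]
        ring
      | j + 1 =>
        rw [if_neg (Nat.succ_ne_zero j)]
        simp only [Nat.add_sub_cancel, add_zero, pvCoef]
        have hpascal : ((m + 2).choose (j + 1) : Int)
            = ((m + 1).choose j : Int) + ((m + 1).choose (j + 1) : Int) := by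
          rw [← Nat.cast_add, ← Nat.choose_succ_succ]
        rw [hpascal]
        have e1 : m + 2 + (j + 1) + 1 = (m + j) + 4 := by ring
        have e2 : m + 1 + j + 1 = (m + j) + 2 := by ring
        have e3 : m + 1 + (j + 1) + 1 = (m + j) + 3 := by ring
        rw [e1, e2, e3, pow_succ, pow_succ, pow_succ, pow_succ]
        ring
    rw [Finset.sum_congr rfl hpt, Finset.sum_add_distrib, Finset.sum_ite_eq'
      (Finset.range (m + 2)) 0 (fun _ => (-1 : Int) ^ (m + 1) * a.getD 0 0),
      if_pos (Finset.mem_range.mpr (by omega)), Finset.sum_sub_distrib]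
  have f4 : ∑ i ∈ Finset.range (m + 1), pvCoef (m + 1) i * (a.getD i 0 - a.getD (i + 1) 0)
      = (∑ i ∈ Finset.range (m + 1), pvCoef (m + 1) i * a.getD i 0)
        - ∑ i ∈ Finset.range (m + 1), pvCoef (m + 1) i * a.getD (i + 1) 0 := by
    rw [← Finset.sum_sub_distrib]
    exact Finset.sum_congr rfl (fun i _ => by ring)
  have hprod : pvCoef (m + 1) 0 * a.getD 0 0 = -((-1 : Int) ^ (m + 1) * a.getD 0 0) := by
    rw [hc0]
    ring
  linarith [f1, f2, f3, f4, hprod]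

-- all differences zero ⇒ the difference sum is 0
theorem pv_sum_zero_of_all_zero (l : List Int) (h : l.all (fun number => number == 0))
    (n : Nat) (c : Nat → Int) : ∑ i ∈ Finset.range n, c i * l.getD i 0 = 0 := by
  apply Finset.sum_eq_zero
  intro i _
  have : l.getD i 0 = 0 := by
    rcases Nat.lt_or_ge i l.length with hi | hi
    · have hmem : l[i] ∈ l := List.getElem_mem hi
      have := List.all_eq_true.mp h _ hmem
      simp at this
      rw [List.getD_eq_getElem l 0 hi, this]
    · exact List.getD_eq_default l 0 hi
  rw [this, mul_zero]

-- (pv_next a).getD i 0 matches the explicit difference for i < len - 1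
theorem pv_next_getD (a : List Int) (i : Nat) (hi : i < a.length - 1) :
    (pv_next a).getD i 0 = a.getD i 0 - a.getD (i + 1) 0 := by
  rw [pv_next_eq_map, PySem.List.getD_map_range _ _ _ _ hi]

theorem pv_A_eq_pvSum : ∀ (n : Nat) (a : List Int), a.length = n → a ≠ [] →
    find_prev_number a = pvSum a.length a := by
  intro n
  induction n using Nat.strong_induction_on with
  | _ n ih =>
    intro a hlen hne
    rw [find_prev_number]
    show (if _h : (pv_next a).all (fun number => number == 0) = true then
        PySem.List.pyGetD a (-1) 0
      else PySem.List.pyGetD a (-1) 0 - find_prev_number (pv_next a)) = pvSum a.length a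
    have hlast : PySem.List.pyGetD a (-1) 0 = a.getLast hne := PySem.List.pyGetD_neg_one a 0 hne
    have hlastD : a.getLast hne = a.getD (a.length - 1) 0 := by
      rw [List.getLast_eq_getElem, List.getD_eq_getElem a 0 (by
        have := List.length_pos_iff.mpr hne; omega)]
    by_cases hz : (pv_next a).all (fun number => number == 0)
    · rw [dif_pos hz, hlast, hlastD]
      rcases Nat.lt_or_ge a.length 2 with h1 | h2
      · -- length 1: pvSum 1 a = a_0
        have : a.length = 1 := by
          have := List.length_pos_iff.mpr hne; omega
        rw [this]
        simp [pvSum, pvCoef]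
      · -- length ≥ 2: pv_step, then the difference sum vanishes
        obtain ⟨m, hm⟩ : ∃ m, a.length = m + 2 := ⟨a.length - 2, by omega⟩
        rw [hm, pv_step m a]
        have hdiff : ∑ i ∈ Finset.range (m + 1), pvCoef (m + 1) i * (a.getD i 0 - a.getD (i + 1) 0)
            = 0 := by
          have hcong : ∀ i ∈ Finset.range (m + 1),
              pvCoef (m + 1) i * (a.getD i 0 - a.getD (i + 1) 0)
                = pvCoef (m + 1) i * (pv_next a).getD i 0 := by
            intro i himem
            rw [pv_next_getD a i (by
              have := Finset.mem_range.mp himem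
              omega)]
          rw [Finset.sum_congr rfl hcong]
          exact pv_sum_zero_of_all_zero (pv_next a) hz (m + 1) (pvCoef (m + 1))
        rw [hdiff]
        have : m + 2 - 1 = m + 1 := by omega
        rw [this]; ring
    · rw [dif_neg hz, hlast, hlastD]
      have hnne : pv_next a ≠ [] := by
        intro hnil; exact hz (by rw [hnil]; rfl)
      have hnl : (pv_next a).length = a.length - 1 := pv_next_length a
      have hlen2 : 2 ≤ a.length := by
        have := List.length_pos_iff.mpr hnne
        omega
      have hrec := ih (pv_next a).length (by omega) (pv_next a) rfl hnne
      rw [hrec]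
      obtain ⟨m, hm⟩ : ∃ m, a.length = m + 2 := ⟨a.length - 2, by omega⟩
      rw [hm, pv_step m a, hnl, hm]
      have hml : m + 2 - 1 = m + 1 := by omega
      rw [hml]
      congr 1
      apply Finset.sum_congr rfl
      intro i himem
      rw [pv_next_getD a i (by rw [hm]; exact Nat.lt_of_lt_of_le (Finset.mem_range.mp himem) (by omega))]

-- ===== VERDICT (by name: the statement is the Claim_ definition above) =====
theorem find_prev_number_spec : Claim_equal_find_prev_number := by
  intro a _ hpre
  unfold Spec_find_prev_number
  rw [pv_A_eq_pvSum a.length a rfl hpre, pv_alt_eq_pvSum]
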